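-- pv_equiv track=rewrite | github.com/aenealabs/aura | src/services/cognitive_memory_service.py | _are_domains_related
-- ===== SOURCE A (Python) =====
-- def _are_domains_related(domain1: str, domain2: str) -> bool:
--     """Check if two domains are semantically related."""
--     related_groups = [
--         {"CICD", "CFN", "KUBERNETES", "INFRASTRUCTURE"},
--         {"IAM", "SECURITY", "COMPLIANCE"},
--         {"CFN", "IAM", "TERRAFORM"},
--         {"API", "APPLICATION", "SERVICE"},
--     ]
--     for group in related_groups:
--         if domain1 in group and domain2 in group:
--             return True
--     return False
-- ===== SOURCE B (Python) =====
-- # inverted index: domain -> set of indices of the related groups it belongs to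
-- _INDEX = {}
-- for _i, _group in enumerate([
--     ["CICD", "CFN", "KUBERNETES", "INFRASTRUCTURE"],
--     ["IAM", "SECURITY", "COMPLIANCE"],
--     ["CFN", "IAM", "TERRAFORM"],
--     ["API", "APPLICATION", "SERVICE"],
-- ]):
--     for _d in _group:
--         _INDEX.setdefault(_d, set()).add(_i)
--
--
-- def _are_domains_related(domain1: str, domain2: str) -> bool:
--     g1 = _INDEX.get(domain1)
--     g2 = _INDEX.get(domain2)
--     return bool(g1 and g2 and g1 & g2)
-- ===== Notes on version B (the rewrite author's own statement) =====
-- stated objective: idiomatic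
-- what changed: Replaces the per-call scan over the four groups (double membership test per group) with a module-level inverted index mapping each domain to the set of group indices it appears in, so a call is two dict lookups and one set-intersection test.
import Mathlib
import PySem

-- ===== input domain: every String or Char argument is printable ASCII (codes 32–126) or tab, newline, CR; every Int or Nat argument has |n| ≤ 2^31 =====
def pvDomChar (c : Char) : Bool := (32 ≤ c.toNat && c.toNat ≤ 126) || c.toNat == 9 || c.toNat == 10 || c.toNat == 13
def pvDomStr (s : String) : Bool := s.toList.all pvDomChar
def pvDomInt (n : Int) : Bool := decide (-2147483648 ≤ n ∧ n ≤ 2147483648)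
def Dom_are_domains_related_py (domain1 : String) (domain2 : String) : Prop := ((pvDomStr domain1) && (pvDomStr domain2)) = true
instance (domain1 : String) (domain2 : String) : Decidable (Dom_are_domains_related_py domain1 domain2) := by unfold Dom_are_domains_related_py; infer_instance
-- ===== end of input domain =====

-- B replaces A's per-call scan over the four groups by a precomputed inverted index
-- (domain → set of group indices) and a single set-intersection test; objective: idiomatic.

-- ===== PORT A =====
-- the 'for group in related_groups: if d1 in group and d2 in group: return True' loop
def pvLoopA : List (PySem.Set String) → String → String → Bool
  | [], _, _ => false
  | g :: rest, d1, d2 =>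
      if PySem.Set.contains g d1 && PySem.Set.contains g d2 then true
      else pvLoopA rest d1 d2

def are_domains_related_py (domain1 : String) (domain2 : String) : Bool :=
  pvLoopA
    [PySem.Set.ofList ["CICD", "CFN", "KUBERNETES", "INFRASTRUCTURE"],
     PySem.Set.ofList ["IAM", "SECURITY", "COMPLIANCE"],
     PySem.Set.ofList ["CFN", "IAM", "TERRAFORM"],
     PySem.Set.ofList ["API", "APPLICATION", "SERVICE"]]
    domain1 domain2

-- ===== PORT B =====
-- module-level build of the inverted index (Source B's enumerate/setdefault loop)
def pvIndexGroups : List (List String) :=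
  [["CICD", "CFN", "KUBERNETES", "INFRASTRUCTURE"],
   ["IAM", "SECURITY", "COMPLIANCE"],
   ["CFN", "IAM", "TERRAFORM"],
   ["API", "APPLICATION", "SERVICE"]]

def pvIndex : PySem.Dict String (PySem.Set Int) :=
  (PySem.List.enumerate pvIndexGroups 0).foldl
    (fun d p => p.2.foldl
      (fun d s => d.modify s [] (fun st => PySem.Set.add st p.1)) d)
    PySem.Dict.empty

-- bool(g1 and g2 and g1 & g2): False on a missing key, else non-emptiness of the intersection
def are_domains_related_py_alt (domain1 : String) (domain2 : String) : Bool :=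
  match pvIndex.get? domain1, pvIndex.get? domain2 with
  | some g1, some g2 => !(PySem.Set.inter g1 g2).isEmpty
  | _, _ => false

-- ===== PRECONDITION & SPEC =====
def Spec_are_domains_related_py (domain1 : String) (domain2 : String) (out : Bool) : Prop := out = are_domains_related_py_alt domain1 domain2
instance (domain1 : String) (domain2 : String) (out : Bool) : Decidable (Spec_are_domains_related_py domain1 domain2 out) := by unfold Spec_are_domains_related_py; infer_instance

-- ===== CLAIM (what is proved, stated in full; the proofs are below) =====
def Claim_equal_are_domains_related_py : Prop := ∀ (domain1 : String) (domain2 : String), Dom_are_domains_related_py domain1 domain2 → Spec_are_domains_related_py domain1 domain2 (are_domains_related_py domain1 domain2)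

-- ===== LEMMAS AND PROOFS =====

-- the keys of the inverted index = every domain occurring in some group
def pvKeys : List String :=
  ["CICD", "CFN", "KUBERNETES", "INFRASTRUCTURE", "IAM", "SECURITY", "COMPLIANCE",
   "TERRAFORM", "API", "APPLICATION", "SERVICE"]

lemma pvIndex_get?_none (d : String) (h : d ∉ pvKeys) : pvIndex.get? d = none := by
  rw [PySem.Dict.get?_eq_none_iff_not_mem_keys]
  have hk : pvIndex.keys = pvKeys := by decide
  rw [hk]; exact h

lemma alt_false_left (d1 d2 : String) (h : d1 ∉ pvKeys) :
    are_domains_related_py_alt d1 d2 = false := by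
  unfold are_domains_related_py_alt
  rw [pvIndex_get?_none d1 h]

lemma alt_false_right (d1 d2 : String) (h : d2 ∉ pvKeys) :
    are_domains_related_py_alt d1 d2 = false := by
  unfold are_domains_related_py_alt
  rw [pvIndex_get?_none d2 h]
  cases pvIndex.get? d1 <;> rfl

lemma A_false_left (d1 d2 : String) (h : d1 ∉ pvKeys) :
    are_domains_related_py d1 d2 = false := by
  simp only [pvKeys, List.mem_cons, List.not_mem_nil, not_or, or_false] at h
  obtain ⟨n1, n2, n3, n4, n5, n6, n7, n8, n9, n10, n11⟩ := h
  have h1 : d1 ∉ ["CICD", "CFN", "KUBERNETES", "INFRASTRUCTURE"] := by simp [n1, n2, n3, n4]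
  have h2 : d1 ∉ ["IAM", "SECURITY", "COMPLIANCE"] := by simp [n5, n6, n7]
  have h3 : d1 ∉ ["CFN", "IAM", "TERRAFORM"] := by simp [n2, n5, n8]
  have h4 : d1 ∉ ["API", "APPLICATION", "SERVICE"] := by simp [n9, n10, n11]
  simp [are_domains_related_py, pvLoopA, h1, h2, h3, h4]

lemma A_false_right (d1 d2 : String) (h : d2 ∉ pvKeys) :
    are_domains_related_py d1 d2 = false := by
  simp only [pvKeys, List.mem_cons, List.not_mem_nil, not_or, or_false] at h
  obtain ⟨n1, n2, n3, n4, n5, n6, n7, n8, n9, n10, n11⟩ := h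
  have h1 : d2 ∉ ["CICD", "CFN", "KUBERNETES", "INFRASTRUCTURE"] := by simp [n1, n2, n3, n4]
  have h2 : d2 ∉ ["IAM", "SECURITY", "COMPLIANCE"] := by simp [n5, n6, n7]
  have h3 : d2 ∉ ["CFN", "IAM", "TERRAFORM"] := by simp [n2, n5, n8]
  have h4 : d2 ∉ ["API", "APPLICATION", "SERVICE"] := by simp [n9, n10, n11]
  simp [are_domains_related_py, pvLoopA, h1, h2, h3, h4]

lemma main_eq (d1 d2 : String) :
    are_domains_related_py d1 d2 = are_domains_related_py_alt d1 d2 := by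
  by_cases h1 : d1 ∈ pvKeys
  · by_cases h2 : d2 ∈ pvKeys
    · fin_cases h1 <;> fin_cases h2 <;> decide
    · rw [A_false_right d1 d2 h2, alt_false_right d1 d2 h2]
  · rw [A_false_left d1 d2 h1, alt_false_left d1 d2 h1]

-- ===== VERDICT (by name: the statement is the Claim_ definition above) =====
theorem are_domains_related_py_spec : Claim_equal_are_domains_related_py := by
  intro d1 d2 _
  exact main_eq d1 d2
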